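-- pv_equiv track=rewrite | github.com/Sheshiyer/brandmint-oracle-aleph | brandmint/core/wave_planner.py | filter_assets_by_domain
-- ===== SOURCE A (Python) =====
-- from typing import Any, Dict, List, Optional
--
-- def filter_assets_by_domain(
--     asset_registry: Dict[str, Any],
--     domain_tags: List[str],
-- ) -> List[str]:
--     """Return asset IDs whose tags overlap with *domain_tags*.
--
--     An asset is included when:
--     - It carries the ``"*"`` tag (universal asset), **or**
--     - Any of its tags intersect with the supplied *domain_tags*.
--
--     Args:
--         asset_registry: Full asset registry dict (asset_id -> definition).
--         domain_tags: Brand-level domain tags (e.g. ``["dtc", "crowdfunding"]``).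
--
--     Returns:
--         Sorted list of matching asset IDs.
--     """
--     if not domain_tags:
--         # With no domain tags, only universal assets qualify.
--         return sorted(
--             aid for aid, adef in asset_registry.items()
--             if "*" in adef.get("tags", [])
--         )
--
--     domain_set = set(domain_tags)
--     matched: List[str] = []
--
--     for asset_id, asset_def in asset_registry.items():
--         tags = set(asset_def.get("tags", []))
--         if "*" in tags or tags & domain_set:
--             matched.append(asset_id)
--
--     return sorted(matched)
-- ===== SOURCE B (Python) =====
-- def filter_assets_by_domain(asset_registry, domain_tags):
--     """Inverted index: tag -> asset ids; answer = union of buckets for '*' and each domain tag."""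
--     index = {}
--     for aid, adef in asset_registry.items():
--         for tag in adef.get("tags", []):
--             index[tag] = index.get(tag, []) + [aid]
--     result = set(index.get("*", []))
--     for t in domain_tags:
--         result.update(index.get(t, []))
--     return sorted(result)
-- ===== Notes on version B (the rewrite author's own statement) =====
-- stated objective: alternative
-- what changed: Replaces the per-asset overlap test with an inverted index (tag -> asset ids) built in one pass, then unions the buckets for '*' and each domain tag and sorts; the empty-domain_tags special case disappears. Pre_ only excludes registries with duplicate asset ids, which cannot represent a Python dict.
import Mathlib
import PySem

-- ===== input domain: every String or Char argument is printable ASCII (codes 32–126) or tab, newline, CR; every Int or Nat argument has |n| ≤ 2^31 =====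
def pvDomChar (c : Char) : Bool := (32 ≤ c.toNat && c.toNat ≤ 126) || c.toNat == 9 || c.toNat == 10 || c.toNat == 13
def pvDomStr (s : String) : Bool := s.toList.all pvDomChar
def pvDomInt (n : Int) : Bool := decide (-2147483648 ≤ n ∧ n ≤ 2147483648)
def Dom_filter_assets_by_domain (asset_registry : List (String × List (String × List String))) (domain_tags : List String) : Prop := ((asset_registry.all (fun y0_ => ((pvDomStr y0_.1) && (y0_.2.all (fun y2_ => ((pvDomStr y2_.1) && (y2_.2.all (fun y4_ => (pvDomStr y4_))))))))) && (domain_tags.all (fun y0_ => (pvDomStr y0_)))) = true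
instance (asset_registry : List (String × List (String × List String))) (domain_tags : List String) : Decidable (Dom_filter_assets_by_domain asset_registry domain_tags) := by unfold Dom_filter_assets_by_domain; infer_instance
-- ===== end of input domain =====

-- B replaces the per-asset overlap test with an inverted index tag -> asset ids, unions the
-- buckets for "*" and each domain tag, and sorts (alternative decomposition, same cost class).

-- ===== PORT A =====
-- adef.get("tags", []) (first-match lookup on the association list, = Python dict .get)
def pvTags (adef : List (String × List String)) : List String :=
  (PySem.Dict.mk adef).getD "tags" []

-- the loop body's test: '"*" in tags or tags & domain_set'
def pvMatch (domain_set : PySem.Set String) (p : String × List (String × List String)) : Bool :=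
  let tags := PySem.Set.ofList (pvTags p.2)
  PySem.Set.contains tags "*" || !(PySem.Set.inter tags domain_set).isEmpty

def filter_assets_by_domain (asset_registry : List (String × List (String × List String))) (domain_tags : List String) : List String :=
  if domain_tags = [] then
    PySem.List.sorted ((asset_registry.filter (fun p => decide ("*" ∈ pvTags p.2))).map Prod.fst) (fun x => x) false
  else
    PySem.List.sorted
      (asset_registry.foldl (fun acc p => if pvMatch (PySem.Set.ofList domain_tags) p then acc ++ [p.1] else acc) [])
      (fun x => x) false

-- ===== PORT B =====
-- 'result = set(index.get("*", [])); for t in domain_tags: result.update(index.get(t, []))'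
def pvUnion (index : PySem.Dict String (List String)) (domain_tags : List String) : PySem.Set String :=
  domain_tags.foldl (fun s t => PySem.Set.update s (index.getD t []))
    (PySem.Set.ofList (index.getD "*" []))
def filter_assets_by_domain_alt (asset_registry : List (String × List (String × List String))) (domain_tags : List String) : List String :=
  PySem.List.sorted
    (pvUnion (asset_registry.foldl (fun d p =>
        (pvTags p.2).foldl (fun d' t => d'.insert t (d'.getD t [] ++ [p.1])) d) PySem.Dict.empty)
      domain_tags)
    (fun x => x) false

-- ===== PRECONDITION & SPEC =====
-- Pre_ excludes association lists with duplicate asset ids: those cannot represent a Python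
-- dict (A's input type), so A is never called on them.
def Pre_filter_assets_by_domain (asset_registry : List (String × List (String × List String))) (domain_tags : List String) : Prop :=
  (asset_registry.map Prod.fst).Nodup

instance (asset_registry : List (String × List (String × List String))) (domain_tags : List String) : Decidable (Pre_filter_assets_by_domain asset_registry domain_tags) := by unfold Pre_filter_assets_by_domain; infer_instance

def pvWitness_filter_assets_by_domain : (List (String × List (String × List String))) × List String :=
  ([("hero", [("tags", ["dtc"])]), ("logo", [("tags", ["*"])]), ("memo", [])], ["dtc", "crowdfunding"])

def Spec_filter_assets_by_domain (asset_registry : List (String × List (String × List String))) (domain_tags : List String) (out : List String) : Prop := out = filter_assets_by_domain_alt asset_registry domain_tags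
instance (asset_registry : List (String × List (String × List String))) (domain_tags : List String) (out : List String) : Decidable (Spec_filter_assets_by_domain asset_registry domain_tags out) := by unfold Spec_filter_assets_by_domain; infer_instance

-- ===== CLAIM (what is proved, stated in full; the proofs are below) =====
def Claim_equal_filter_assets_by_domain : Prop := ∀ (asset_registry : List (String × List (String × List String))) (domain_tags : List String), Dom_filter_assets_by_domain asset_registry domain_tags → Pre_filter_assets_by_domain asset_registry domain_tags → Spec_filter_assets_by_domain asset_registry domain_tags (filter_assets_by_domain asset_registry domain_tags)

-- ===== LEMMAS AND PROOFS =====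

-- membership in one bucket after the inner (per-asset) index loop
theorem pv_inner_mem (ts : List String) (aid : String) (d : PySem.Dict String (List String)) (t x : String) :
    x ∈ (ts.foldl (fun d' t' => d'.insert t' (d'.getD t' [] ++ [aid])) d).getD t [] ↔
      x ∈ d.getD t [] ∨ (x = aid ∧ t ∈ ts) := by
  induction ts generalizing d with
  | nil => simp
  | cons h tl ih =>
    simp only [List.foldl_cons]
    rw [ih, PySem.Dict.getD_insert]
    by_cases ht : t = h <;> simp [ht] <;> try tauto

-- membership in one bucket of the full inverted index
theorem pv_index_mem (reg : List (String × List (String × List String))) (d : PySem.Dict String (List String)) (t x : String) :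
    x ∈ (reg.foldl (fun d p => (pvTags p.2).foldl (fun d' t' => d'.insert t' (d'.getD t' [] ++ [p.1])) d) d).getD t [] ↔
      x ∈ d.getD t [] ∨ ∃ p ∈ reg, x = p.1 ∧ t ∈ pvTags p.2 := by
  induction reg generalizing d with
  | nil => simp
  | cons q rest ih =>
    simp only [List.foldl_cons]
    rw [ih, pv_inner_mem]
    simp only [List.mem_cons]
    constructor
    · rintro (⟨h | ⟨rfl, ht⟩⟩ | ⟨p, hp, h⟩)
      · exact Or.inl h
      · exact Or.inr ⟨q, Or.inl rfl, rfl, ht⟩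
      · exact Or.inr ⟨p, Or.inr hp, h⟩
    · rintro (h | ⟨p, hp | hp, h⟩)
      · exact Or.inl (Or.inl h)
      · subst hp; exact Or.inl (Or.inr h)
      · exact Or.inr ⟨p, hp, h⟩

-- membership in a fold of Set.update over a list of buckets
theorem pv_updates_mem (l : List String) (f : String → List String) (s : PySem.Set String) (x : String) :
    x ∈ l.foldl (fun s t => PySem.Set.update s (f t)) s ↔ x ∈ s ∨ ∃ t ∈ l, x ∈ f t := by
  induction l generalizing s with
  | nil => simp
  | cons h tl ih =>
    simp only [List.foldl_cons]
    rw [ih, PySem.Set.mem_update]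
    simp only [List.mem_cons]
    constructor
    · rintro (⟨h1 | h1⟩ | ⟨t, ht, hx⟩)
      · exact Or.inl h1
      · exact Or.inr ⟨h, Or.inl rfl, h1⟩
      · exact Or.inr ⟨t, Or.inr ht, hx⟩
    · rintro (h1 | ⟨t, ht | ht, hx⟩)
      · exact Or.inl (Or.inl h1)
      · subst ht; exact Or.inl (Or.inr hx)
      · exact Or.inr ⟨t, ht, hx⟩

theorem pv_updates_nodup (l : List String) (f : String → List String) (s : PySem.Set String) (hs : s.Nodup) :
    (l.foldl (fun s t => PySem.Set.update s (f t)) s).Nodup := by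
  induction l generalizing s with
  | nil => exact hs
  | cons h tl ih => exact ih _ (PySem.Set.nodup_update _ _ hs)

-- the loop test of A, characterised
theorem pv_match_iff (domain_tags : List String) (p : String × List (String × List String)) :
    pvMatch (PySem.Set.ofList domain_tags) p = true ↔
      "*" ∈ pvTags p.2 ∨ ∃ t ∈ domain_tags, t ∈ pvTags p.2 := by
  unfold pvMatch
  simp only [Bool.or_eq_true, PySem.Set.contains_iff, PySem.Set.mem_ofList,
    Bool.not_eq_true', List.isEmpty_eq_false_iff, ne_eq]
  constructor
  · rintro (h | h)
    · exact Or.inl h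
    · rcases List.exists_mem_of_ne_nil _ h with ⟨t, ht⟩
      rw [PySem.Set.mem_inter] at ht
      exact Or.inr ⟨t, (PySem.Set.mem_ofList _ _).1 ht.2, (PySem.Set.mem_ofList _ _).1 ht.1⟩
  · rintro (h | ⟨t, ht, htp⟩)
    · exact Or.inl h
    · refine Or.inr (List.ne_nil_of_mem (a := t) ?_)
      rw [PySem.Set.mem_inter, PySem.Set.mem_ofList, PySem.Set.mem_ofList]
      exact ⟨htp, ht⟩

-- the verdict
theorem pv_main (reg : List (String × List (String × List String))) (domain_tags : List String)
    (hn : (reg.map Prod.fst).Nodup) :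
    filter_assets_by_domain reg domain_tags = filter_assets_by_domain_alt reg domain_tags := by
  unfold filter_assets_by_domain filter_assets_by_domain_alt pvUnion
  have hBmem : ∀ x, x ∈ domain_tags.foldl (fun s t => PySem.Set.update s
      ((reg.foldl (fun d p => (pvTags p.2).foldl (fun d' t' => d'.insert t' (d'.getD t' [] ++ [p.1])) d) PySem.Dict.empty).getD t []))
      (PySem.Set.ofList ((reg.foldl (fun d p => (pvTags p.2).foldl (fun d' t' => d'.insert t' (d'.getD t' [] ++ [p.1])) d) PySem.Dict.empty).getD "*" [])) ↔
      ∃ p ∈ reg, x = p.1 ∧ ("*" ∈ pvTags p.2 ∨ ∃ t ∈ domain_tags, t ∈ pvTags p.2) := by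
    intro x
    rw [pv_updates_mem]
    rw [PySem.Set.mem_ofList]
    simp only [pv_index_mem, PySem.Dict.getD_empty, List.not_mem_nil, false_or]
    constructor
    · rintro (⟨p, hp, rfl, ht⟩ | ⟨t, htl, p, hp, rfl, htp⟩)
      · exact ⟨p, hp, rfl, Or.inl ht⟩
      · exact ⟨p, hp, rfl, Or.inr ⟨t, htl, htp⟩⟩
    · rintro ⟨p, hp, rfl, h | ⟨t, htl, htp⟩⟩
      · exact Or.inl ⟨p, hp, rfl, h⟩
      · exact Or.inr ⟨t, htl, p, hp, rfl, htp⟩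
  have hBnodup : (domain_tags.foldl (fun s t => PySem.Set.update s
      ((reg.foldl (fun d p => (pvTags p.2).foldl (fun d' t' => d'.insert t' (d'.getD t' [] ++ [p.1])) d) PySem.Dict.empty).getD t []))
      (PySem.Set.ofList ((reg.foldl (fun d p => (pvTags p.2).foldl (fun d' t' => d'.insert t' (d'.getD t' [] ++ [p.1])) d) PySem.Dict.empty).getD "*" []))).Nodup :=
    pv_updates_nodup _ _ _ (PySem.Set.nodup_ofList _)
  split
  case isTrue hdt =>
    subst hdt
    apply PySem.List.sorted_eq_sorted_of_perm _ _ _ (fun a b h => h)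
    rw [List.perm_ext_iff_of_nodup _ hBnodup]
    · intro x
      rw [hBmem x]
      simp only [List.mem_map, List.mem_filter, decide_eq_true_eq, List.not_mem_nil, false_and,
        exists_false, or_false]
      constructor
      · rintro ⟨p, ⟨hp, ht⟩, rfl⟩; exact ⟨p, hp, rfl, ht⟩
      · rintro ⟨p, hp, rfl, ht⟩; exact ⟨p, ⟨hp, ht⟩, rfl⟩
    · exact hn.sublist (List.Sublist.map Prod.fst List.filter_sublist)
  case isFalse hdt =>
    rw [PySem.List.foldl_append_if (pvMatch (PySem.Set.ofList domain_tags)) Prod.fst]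
    simp only [List.nil_append]
    apply PySem.List.sorted_eq_sorted_of_perm _ _ _ (fun a b h => h)
    rw [List.perm_ext_iff_of_nodup (hn.sublist (List.Sublist.map Prod.fst List.filter_sublist)) hBnodup]
    intro x
    rw [hBmem x]
    simp only [List.mem_map, List.mem_filter]
    constructor
    · rintro ⟨p, ⟨hp, hm⟩, rfl⟩
      exact ⟨p, hp, rfl, (pv_match_iff domain_tags p).1 hm⟩
    · rintro ⟨p, hp, rfl, h⟩
      exact ⟨p, ⟨hp, (pv_match_iff domain_tags p).2 h⟩, rfl⟩

-- ===== VERDICT (by name: the statement is the Claim_ definition above) =====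
theorem filter_assets_by_domain_spec : Claim_equal_filter_assets_by_domain := by
  intro reg tags _ hpre
  unfold Spec_filter_assets_by_domain
  exact pv_main reg tags hpre
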